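-- pv_equiv track=rewrite | github.com/vnagpal25/aoc-2025 | 2025/code/6.py | part1
-- ===== SOURCE A (Python) =====
-- import math
--
-- def part1(puzzle: str):
--     puzzle = puzzle.strip().splitlines()
--     operators = puzzle[-1].split()
--     numbers = list(map(str.split, puzzle[:-1]))
--     operands = list(zip(*numbers))
--
--     total = 0
--
--     for nums, op in zip(operands, operators):
--         nums = map(int, nums)
--         if op == "*":
--             total += math.prod(nums)
--         elif op == "+":
--             total += sum(nums)
--
--     return total
-- ===== SOURCE B (Python) =====
-- def part1(puzzle: str):
--     lines = puzzle.strip().splitlines()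
--     ops = lines[-1].split()
--     rows = [line.split() for line in lines[:-1]]
--     cols = min((len(r) for r in rows), default=0)
--     accs = [1 if op == "*" else 0 if op == "+" else None for op in ops[:cols]]
--     for r in rows:
--         accs = [a if a is None else
--                 (a * int(r[j]) if ops[j] == "*" else a + int(r[j]))
--                 for j, a in enumerate(accs)]
--     return sum(a for a in accs if a is not None)
-- ===== Notes on version B (the rewrite author's own statement) =====
-- stated objective: alternative
-- what changed: B drops A's transpose (zip(*rows)) and per-column math.prod/sum reductions, instead making a single row-wise pass that updates one accumulator per column (seeded 1 for '*', 0 for '+', skipped otherwise) and summing the accumulators at the end.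
import Mathlib
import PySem

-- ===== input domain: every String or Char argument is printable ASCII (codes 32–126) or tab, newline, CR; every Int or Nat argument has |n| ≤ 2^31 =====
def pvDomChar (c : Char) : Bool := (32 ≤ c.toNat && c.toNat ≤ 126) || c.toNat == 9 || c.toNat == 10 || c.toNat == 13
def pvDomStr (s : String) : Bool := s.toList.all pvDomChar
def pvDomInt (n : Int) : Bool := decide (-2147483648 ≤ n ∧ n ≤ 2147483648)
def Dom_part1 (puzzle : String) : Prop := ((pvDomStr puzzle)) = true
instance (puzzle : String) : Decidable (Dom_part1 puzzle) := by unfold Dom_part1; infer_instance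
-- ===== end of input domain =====

-- B replaces A's transpose-then-reduce (zip(*rows), then math.prod/sum per column) by a single
-- row-wise pass over per-column accumulators; same return value, objective: alternative decomposition.

-- Shared preamble of both Pythons (both start with the same three lines):
-- lines = puzzle.strip().splitlines(); operators = lines[-1].split(); data rows = lines[:-1] split.
-- pyGetD …(-1) is the total form of lines[-1] (IndexError on [] is excluded by Pre_part1).
def pvLines (puzzle : String) : List String :=
  PySem.Str.splitlines (PySem.Str.strip puzzle)
def pvOps (puzzle : String) : List String :=
  PySem.Str.split₀ (PySem.List.pyGetD (pvLines puzzle) (-1) "")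
def pvRows (puzzle : String) : List (List String) :=
  (PySem.List.slice (pvLines puzzle) none (some (-1))).map PySem.Str.split₀

-- int(s), total form: Pre_part1 guarantees ofStr? = some at every cell either Python converts.
def pvToInt (s : String) : Int := (PySem.Int.ofStr? s).getD 0

-- ===== PORT A =====
-- min of the row lengths (0 when there are no rows)
def pvMinLen (rows : List (List String)) : Nat :=
  match rows with
  | [] => 0
  | r :: rs => rs.foldl (fun m x => min m x.length) r.length

-- Python's builtin zip(*rows), by its contract: the list of columns j < min row length
-- (empty when rows = []); r.getD j "" is r[j], in range for every produced j.
def pvZipStar (rows : List (List String)) : List (List String) :=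
  (List.range (pvMinLen rows)).map (fun j => rows.map (fun r => r.getD j ""))

-- math.prod(map(int, nums)) and sum(map(int, nums))
def pvProd (nums : List String) : Int := nums.foldl (fun acc s => acc * pvToInt s) 1
def pvSum (nums : List String) : Int := nums.foldl (fun acc s => acc + pvToInt s) 0

def part1 (puzzle : String) : Int :=
  let operators := pvOps puzzle
  let numbers := pvRows puzzle
  let operands := pvZipStar numbers
  (operands.zip operators).foldl
    (fun total x =>
      if x.2 = "*" then total + pvProd x.1
      else if x.2 = "+" then total + pvSum x.1
      else total) 0

-- ===== PORT B =====
-- accumulator seed per operator: 1 for '*', 0 for '+', None (skip) otherwise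
def pvInitAcc (op : String) : Option Int :=
  if op = "*" then some 1 else if op = "+" then some 0 else none

-- one data row folded into the accumulators (the list comprehension over enumerate(accs));
-- ops.getD j "" / r.getD j "" are ops[j] / r[j], in range for every index mapIdx produces.
def pvStepRow (ops : List String) (accs : List (Option Int)) (r : List String) : List (Option Int) :=
  accs.mapIdx (fun j a? => a?.map (fun a =>
    if ops.getD j "" = "*" then a * pvToInt (r.getD j "") else a + pvToInt (r.getD j "")))

-- total += a for the non-None accumulators (the generator 'a for a in accs if a is not None')
def pvAddOpt (t : Int) (a? : Option Int) : Int :=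
  match a? with | some a => t + a | none => t

def part1_alt (puzzle : String) : Int :=
  let ops := pvOps puzzle
  let rows := pvRows puzzle
  let cols := PySem.List.minD (rows.map (fun r => r.length)) id 0  -- min(map(len, rows), default=0)
  let accs0 := (ops.take cols).map pvInitAcc                       -- ops[:cols]
  let accs := rows.foldl (pvStepRow ops) accs0
  accs.foldl pvAddOpt 0

-- ===== PRECONDITION & SPEC =====
-- Pre_part1 = exactly the inputs where the Python A returns: the stripped puzzle is non-empty
-- (else lines[-1] raises IndexError) and every token in a column paired with a '*' or '+'
-- operator parses as a Python int (else int() raises ValueError).  B raises at the same inputs.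
def Pre_part1 (puzzle : String) : Prop :=
  pvLines puzzle ≠ [] ∧
  ∀ r ∈ pvRows puzzle, ∀ j : Nat,
    j < min (pvMinLen (pvRows puzzle)) (pvOps puzzle).length →
    ((pvOps puzzle).getD j "" = "*" ∨ (pvOps puzzle).getD j "" = "+") →
    PySem.Int.ofStr? (r.getD j "") ≠ none
instance (puzzle : String) : Decidable (Pre_part1 puzzle) := by unfold Pre_part1; infer_instance

def pvWitness_part1 : String := "1 2\n3 4\n* +"

def Spec_part1 (puzzle : String) (out : Int) : Prop := out = part1_alt puzzle
instance (puzzle : String) (out : Int) : Decidable (Spec_part1 puzzle out) := by unfold Spec_part1; infer_instance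

-- ===== CLAIM (what is proved, stated in full; the proofs are below) =====
def Claim_equal_part1 : Prop := ∀ (puzzle : String), Dom_part1 puzzle → Pre_part1 puzzle → Spec_part1 puzzle (part1 puzzle)

-- ===== LEMMAS AND PROOFS =====

-- B's cols is A's implicit zip(*) truncation length
theorem pv_minD_eq_minLen (rows : List (List String)) :
    PySem.List.minD (rows.map (fun r => r.length)) id 0 = pvMinLen rows := by
  cases rows with
  | nil => rfl
  | cons r rs =>
    simp only [PySem.List.minD, PySem.List.min?, List.map_cons, List.foldl_cons, pvMinLen]
    generalize r.length = a
    induction rs generalizing a with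
    | nil => rfl
    | cons x xs ih =>
      simp only [List.map_cons, List.foldl_cons]
      by_cases h : x.length < a
      · simpa [h, Nat.min_def, Nat.le_of_lt h, (Nat.not_le.mpr h)] using ih (min a x.length)
      · simpa [h, Nat.min_def, Nat.not_lt.mp h] using ih (min a x.length)

-- A's zipped (column, operator) list, as a map over column indices
theorem pv_zip_zipStar (rows : List (List String)) (ops : List String) :
    (pvZipStar rows).zip ops =
      (List.range (min (pvMinLen rows) ops.length)).map
        (fun j => (rows.map (fun r => r.getD j ""), ops.getD j "")) := by
  apply List.ext_getElem
  · simp [pvZipStar]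
  · intro i h1 h2
    simp only [pvZipStar] at h1 ⊢
    simp only [List.getElem_zip, List.getElem_map, List.getElem_range]
    have hi : i < ops.length := by simp at h2; omega
    rw [List.getD_eq_getElem _ _ hi]

-- B's initial accumulators, as a map over column indices
theorem pv_accs0_range (ops : List String) (n : Nat) :
    (ops.take n).map pvInitAcc =
      (List.range (min n ops.length)).map (fun j => pvInitAcc (ops.getD j "")) := by
  apply List.ext_getElem
  · simp
  · intro i h1 h2
    simp only [List.getElem_map, List.getElem_range, List.getElem_take]
    have hi : i < ops.length := by simp at h1; omega
    rw [List.getD_eq_getElem _ _ hi]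

-- one row step, pointwise on a range-indexed accumulator list
theorem pv_stepRow_range (ops : List String) (m : Nat) (g : Nat → Option Int) (r : List String) :
    pvStepRow ops ((List.range m).map g) r =
      (List.range m).map (fun j => (g j).map (fun a =>
        if ops.getD j "" = "*" then a * pvToInt (r.getD j "") else a + pvToInt (r.getD j ""))) := by
  apply List.ext_getElem
  · simp [pvStepRow]
  · intro i h1 h2
    simp [pvStepRow, List.getElem_mapIdx]

-- the whole row pass, pointwise on a range-indexed accumulator list
theorem pv_fold_rows (ops : List String) (m : Nat) (rows : List (List String)) (g : Nat → Option Int) :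
    rows.foldl (pvStepRow ops) ((List.range m).map g) =
      (List.range m).map (fun j => rows.foldl
        (fun a? r => a?.map (fun a =>
          if ops.getD j "" = "*" then a * pvToInt (r.getD j "") else a + pvToInt (r.getD j "")))
        (g j)) := by
  induction rows generalizing g with
  | nil => rfl
  | cons r rs ih =>
    simp only [List.foldl_cons]
    rw [pv_stepRow_range, ih]

-- an Option.map-lifted fold from some a is the plain fold
theorem pv_fold_option {β : Type} (l : List β) (f : Int → β → Int) (a : Int) :
    l.foldl (fun a? x => a?.map (fun v => f v x)) (some a) = some (l.foldl f a) := by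
  induction l generalizing a with
  | nil => rfl
  | cons x xs ih => simp [List.foldl_cons, ih]

-- an Option.map-lifted fold from none stays none
theorem pv_fold_option_none {β : Type} (l : List β) (f : Int → β → Int) :
    l.foldl (fun a? x => a?.map (fun v => f v x)) none = none := by
  induction l with
  | nil => rfl
  | cons x xs ih => simpa using ih

theorem pv_pointwise (rows : List (List String)) (ops : List String) (t : Int) (j : Nat) :
    (if ops.getD j "" = "*" then t + pvProd (rows.map (fun r => r.getD j ""))
     else if ops.getD j "" = "+" then t + pvSum (rows.map (fun r => r.getD j ""))
     else t) =
    pvAddOpt t (rows.foldl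
        (fun a? r => a?.map (fun a =>
          if ops.getD j "" = "*" then a * pvToInt (r.getD j "") else a + pvToInt (r.getD j "")))
        (pvInitAcc (ops.getD j ""))) := by
  by_cases h1 : ops.getD j "" = "*"
  · simp only [h1, pvInitAcc, reduceIte]
    rw [pv_fold_option rows (fun a r => a * pvToInt (r.getD j "")) 1]
    simp [pvProd, pvAddOpt, List.foldl_map]
  · by_cases h2 : ops.getD j "" = "+"
    · simp only [h2, pvInitAcc, String.reduceEq, reduceIte]
      rw [pv_fold_option rows (fun a r => a + pvToInt (r.getD j "")) 0]
      simp [pvSum, pvAddOpt, List.foldl_map]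
    · simp only [h1, h2, pvInitAcc, reduceIte]
      rw [pv_fold_option_none]
      rfl

-- A's whole loop, as a fold over column indices of B's per-column result
theorem pv_A_side (rows : List (List String)) (ops : List String) :
    ((pvZipStar rows).zip ops).foldl
      (fun total x =>
        if x.2 = "*" then total + pvProd x.1
        else if x.2 = "+" then total + pvSum x.1
        else total) 0 =
    (List.range (min (pvMinLen rows) ops.length)).foldl
      (fun t j => pvAddOpt t (rows.foldl
        (fun a? r => a?.map (fun a =>
          if ops.getD j "" = "*" then a * pvToInt (r.getD j "") else a + pvToInt (r.getD j "")))
        (pvInitAcc (ops.getD j "")))) 0 := by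
  rw [pv_zip_zipStar, List.foldl_map]
  apply PySem.List.foldl_congr_mem
  intro t j _
  exact pv_pointwise rows ops t j

-- B's whole pipeline, as the same fold over column indices
theorem pv_B_side (rows : List (List String)) (ops : List String) :
    (rows.foldl (pvStepRow ops)
        ((ops.take (PySem.List.minD (rows.map (fun r => r.length)) id 0)).map pvInitAcc)).foldl
      pvAddOpt 0 =
    (List.range (min (pvMinLen rows) ops.length)).foldl
      (fun t j => pvAddOpt t (rows.foldl
        (fun a? r => a?.map (fun a =>
          if ops.getD j "" = "*" then a * pvToInt (r.getD j "") else a + pvToInt (r.getD j "")))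
        (pvInitAcc (ops.getD j "")))) 0 := by
  rw [pv_minD_eq_minLen, pv_accs0_range, pv_fold_rows, List.foldl_map]

theorem part1_eq_alt (puzzle : String) : part1 puzzle = part1_alt puzzle := by
  simp only [part1, part1_alt]
  rw [pv_A_side (pvRows puzzle) (pvOps puzzle), pv_B_side (pvRows puzzle) (pvOps puzzle)]

-- ===== VERDICT (by name: the statement is the Claim_ definition above) =====
theorem part1_spec : Claim_equal_part1 := by
  intro puzzle _ _
  unfold Spec_part1
  exact part1_eq_alt puzzle
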